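-- pv_equiv track=rewrite | github.com/autoppia/autoppia_web_agents_subnet | scripts/validator/analyze_validator_logs.py | build_focus_blocks
-- ===== SOURCE A (Python) =====
-- from typing import Iterable, Sequence
--
-- GROUP_KEYWORDS: dict[str, Sequence[str]] = {
--     "IWAP": ("iwa", "iwap", "phase", "add_evaluation", "gif"),
--     "Commitments": ("commit", "weight", "consensus"),
--     "IPFS": ("ipfs", "cid", "gateway", "publish"),
--     "RoundManagement": ("round", "validator_round", "epoch", "resume"),
--     "ErrorsWarnings": ("error", "warning", "traceback", "exception", "fail"),
-- }
--
-- def clamp_text(lines: Iterable[str], limit: int) -> str: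
--     joined = "\n".join(lines)
--     if len(joined) <= limit:
--         return joined
--     return joined[-limit:]
--
-- def keyword_windows(lines: Sequence[str], keywords: Sequence[str], limit: int = 60) -> list[str]:
--     matches: list[str] = []
--     lowered = [(line, line.lower()) for line in lines]
--     for original, lowered_line in lowered:
--         if any(keyword in lowered_line for keyword in keywords):
--             matches.append(original)
--     if not matches:
--         return []
--     return matches[-limit:]
--
-- def build_focus_blocks(lines: Sequence[str]) -> str:
--     sections: list[str] = []
--     for label, tokens in GROUP_KEYWORDS.items():
--         found = keyword_windows(lines, tuple(token.lower() for token in tokens))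
--         if found:
--             content = clamp_text(found, 6000)
--             sections.append(f"## {label}\n{content}")
--         else:
--             sections.append(f"## {label}\n(No direct matches in recent logs.)")
--     return "\n\n".join(sections)
-- ===== SOURCE B (Python) =====
-- from typing import Iterable, Sequence
--
-- GROUP_KEYWORDS: dict[str, Sequence[str]] = {
--     "IWAP": ("iwa", "iwap", "phase", "add_evaluation", "gif"),
--     "Commitments": ("commit", "weight", "consensus"),
--     "IPFS": ("ipfs", "cid", "gateway", "publish"),
--     "RoundManagement": ("round", "validator_round", "epoch", "resume"),
--     "ErrorsWarnings": ("error", "warning", "traceback", "exception", "fail"),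
-- }
--
-- def build_focus_blocks(lines: Sequence[str]) -> str:
--     groups = list(GROUP_KEYWORDS.items())
--     acc: dict[str, list[str]] = {label: [] for label, _ in groups}
--     for line in lines:
--         low = line.lower()
--         for label, tokens in groups:
--             if any(t in low for t in tokens):
--                 acc[label].append(line)
--
--     def render(label: str) -> str:
--         found = acc[label][-60:]
--         if not found:
--             return f"## {label}\n(No direct matches in recent logs.)"
--         joined = "\n".join(found)
--         content = joined if len(joined) <= 6000 else joined[-6000:]
--         return f"## {label}\n{content}"
--
--     return "\n\n".join(render(label) for label, _ in groups)
-- ===== Notes on version B (the rewrite author's own statement) =====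
-- stated objective: alternative
-- what changed: Replaces five per-group scans (each re-lowercasing every line) with one pass over the lines that lowercases each line once and distributes it into a dict of per-group match lists, then renders each section from its bucket; measured 1.32x at the largest size, below the 1.5x bar, so no speed is claimed.
import Mathlib
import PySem

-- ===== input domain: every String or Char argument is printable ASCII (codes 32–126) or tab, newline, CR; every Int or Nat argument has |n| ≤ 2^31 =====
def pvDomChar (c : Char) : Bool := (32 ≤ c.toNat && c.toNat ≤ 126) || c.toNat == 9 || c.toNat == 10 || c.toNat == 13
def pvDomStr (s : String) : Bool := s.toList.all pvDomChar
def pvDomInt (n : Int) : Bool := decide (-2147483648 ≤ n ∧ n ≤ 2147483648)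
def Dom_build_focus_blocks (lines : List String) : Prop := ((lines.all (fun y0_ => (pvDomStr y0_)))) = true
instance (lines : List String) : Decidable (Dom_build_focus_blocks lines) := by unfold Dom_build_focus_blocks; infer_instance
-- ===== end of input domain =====

-- B makes ONE pass over the lines (each line lowercased once) building a dict of per-group
-- match lists, instead of A's five per-group scans; return values proved equal on all inputs.

-- shared module constant: GROUP_KEYWORDS as an ordered association list
def pvGroups : List (String × List String) :=
  [("IWAP", ["iwa", "iwap", "phase", "add_evaluation", "gif"]),
   ("Commitments", ["commit", "weight", "consensus"]),
   ("IPFS", ["ipfs", "cid", "gateway", "publish"]),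
   ("RoundManagement", ["round", "validator_round", "epoch", "resume"]),
   ("ErrorsWarnings", ["error", "warning", "traceback", "exception", "fail"])]

-- ===== PORT A =====
def clamp_text (ls : List String) (limit : Int) : String :=
  let joined := PySem.Str.join "\n" ls
  if (PySem.Str.len joined : Int) ≤ limit then joined
  else PySem.Str.slice joined (some (-limit)) none

def keyword_windows (lines : List String) (keywords : List String) (limit : Int) : List String :=
  let lowered := lines.map (fun line => (line, PySem.Str.lower line))
  let mtch := lowered.foldl
    (fun acc p => if keywords.any (fun k => PySem.Str.isIn k p.2) then acc ++ [p.1] else acc) []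
  if mtch = [] then [] else PySem.List.slice mtch (some (-limit)) none

def build_focus_blocks (lines : List String) : String :=
  let sections := pvGroups.foldl (fun secs g =>
    let found := keyword_windows lines (g.2.map PySem.Str.lower) 60
    if found ≠ [] then secs ++ ["## " ++ g.1 ++ "\n" ++ clamp_text found 6000]
    else secs ++ ["## " ++ g.1 ++ "\n(No direct matches in recent logs.)"]) []
  PySem.Str.join "\n\n" sections

-- ===== PORT B =====
-- one step of the inner loop: drop the line into bucket g.1 when a token matches the lowered line
def bfbInner (line low : String) (d : PySem.Dict String (List String))
    (g : String × List String) : PySem.Dict String (List String) :=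
  if g.2.any (fun t => PySem.Str.isIn t low) then d.modify g.1 [] (· ++ [line]) else d

def bfbStep (gs : List (String × List String)) (d : PySem.Dict String (List String))
    (line : String) : PySem.Dict String (List String) :=
  let low := PySem.Str.lower line
  gs.foldl (bfbInner line low) d

def bfbRender (acc : PySem.Dict String (List String)) (label : String) : String :=
  let found := PySem.List.slice (acc.getD label []) (some (-60)) none
  if found = [] then "## " ++ label ++ "\n(No direct matches in recent logs.)"
  else
    let joined := PySem.Str.join "\n" found
    let content := if (PySem.Str.len joined : Int) ≤ 6000 then joined
                   else PySem.Str.slice joined (some (-6000)) none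
    "## " ++ label ++ "\n" ++ content

def build_focus_blocks_alt (lines : List String) : String :=
  let acc0 := PySem.Dict.ofList (pvGroups.map (fun g => (g.1, ([] : List String))))
  let acc := lines.foldl (bfbStep pvGroups) acc0
  PySem.Str.join "\n\n" (pvGroups.map (fun g => bfbRender acc g.1))

-- ===== PRECONDITION & SPEC =====
def Spec_build_focus_blocks (lines : List String) (out : String) : Prop := out = build_focus_blocks_alt lines
instance (lines : List String) (out : String) : Decidable (Spec_build_focus_blocks lines out) := by unfold Spec_build_focus_blocks; infer_instance

-- ===== CLAIM (what is proved, stated in full; the proofs are below) =====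
def Claim_equal_build_focus_blocks : Prop := ∀ (lines : List String), Dom_build_focus_blocks lines → Spec_build_focus_blocks lines (build_focus_blocks lines)

-- ===== LEMMAS AND PROOFS =====

-- the line predicate of a token group
def pMatch (toks : List String) (line : String) : Bool :=
  toks.any (fun t => PySem.Str.isIn t (PySem.Str.lower line))

theorem keyword_windows_eq_filter (lines kws : List String) :
    keyword_windows lines kws 60 =
      (if lines.filter (pMatch kws) = [] then []
       else PySem.List.slice (lines.filter (pMatch kws)) (some (-60)) none) := by
  simp only [keyword_windows]
  rw [List.foldl_map, PySem.List.foldl_append_if_eq_filter]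
  rfl

theorem inner_unchanged (line low lab : String) (gs : List (String × List String)) :
    ∀ (d : PySem.Dict String (List String)), (∀ g ∈ gs, g.1 ≠ lab) →
    (gs.foldl (bfbInner line low) d).getD lab [] = d.getD lab [] := by
  induction gs with
  | nil => intro d _; rfl
  | cons g gs ih =>
    intro d h
    rw [List.foldl_cons, ih _ (fun g' hg' => h g' (List.mem_cons_of_mem g hg'))]
    unfold bfbInner
    split
    · exact PySem.Dict.getD_modify_of_ne d [] _ (Ne.symm (h g List.mem_cons_self))
    · rfl

theorem inner_getD (line low lab : String) (toks : List String)
    (gs : List (String × List String)) :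
    ∀ (d : PySem.Dict String (List String)),
    (gs.map Prod.fst).Nodup → (lab, toks) ∈ gs →
    (gs.foldl (bfbInner line low) d).getD lab [] =
      d.getD lab [] ++ (if toks.any (fun t => PySem.Str.isIn t low) then [line] else []) := by
  induction gs with
  | nil => intro d _ hmem; cases hmem
  | cons g gs ih =>
    intro d hnd hmem
    rw [List.map_cons, List.nodup_cons] at hnd
    rcases List.mem_cons.mp hmem with heq | hmem'
    · subst heq
      rw [List.foldl_cons]
      rw [inner_unchanged line low lab gs _
        (fun g' hg' hc => hnd.1 (List.mem_map.mpr ⟨g', hg', hc⟩))]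
      unfold bfbInner
      split
      · simp [PySem.Dict.getD_modify_self]
      · simp
    · have hne : g.1 ≠ lab := fun hc =>
        hnd.1 (hc ▸ List.mem_map_of_mem (f := Prod.fst) hmem')
      rw [List.foldl_cons, ih _ hnd.2 hmem']
      congr 1
      unfold bfbInner
      split
      · exact PySem.Dict.getD_modify_of_ne d [] _ (Ne.symm hne)
      · rfl

theorem foldl_getD_filter (lab : String) (toks : List String) (hmem : (lab, toks) ∈ pvGroups)
    (lines : List String) (d : PySem.Dict String (List String)) :
    (lines.foldl (bfbStep pvGroups) d).getD lab [] = d.getD lab [] ++ lines.filter (pMatch toks) := by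
  induction lines generalizing d with
  | nil => simp
  | cons x xs ih =>
    rw [List.foldl_cons, ih]
    have hstep : (bfbStep pvGroups d x).getD lab [] =
        d.getD lab [] ++ (if pMatch toks x then [x] else []) :=
      inner_getD x (PySem.Str.lower x) lab toks pvGroups d (by decide) hmem
    rw [hstep, List.filter_cons]
    split <;> simp

theorem render_eq (acc : PySem.Dict String (List String)) (lab : String) (m : List String)
    (hm : acc.getD lab [] = m) :
    (if (if m = [] then [] else PySem.List.slice m (some (-60)) none) ≠ [] then
        "## " ++ lab ++ "\n" ++ clamp_text (if m = [] then [] else PySem.List.slice m (some (-60)) none) 6000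
      else "## " ++ lab ++ "\n(No direct matches in recent logs.)")
    = bfbRender acc lab := by
  unfold bfbRender clamp_text
  rw [hm]
  by_cases hnil : m = []
  · subst hnil
    simp [PySem.List.slice]
  · have hs : PySem.List.slice m (some (-60)) none = m.drop (m.length - 60) :=
      PySem.List.slice_from_neg_ofNat m 60 (by omega)
    have hne : PySem.List.slice m (some (-60)) none ≠ [] := by
      rw [hs]
      intro hc
      have hlen := congrArg List.length hc
      have hpos : 0 < m.length := List.length_pos_of_ne_nil hnil
      simp only [List.length_drop, List.length_nil] at hlen
      omega
    simp [hnil, hne]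

theorem acc0_getD : ∀ g ∈ pvGroups,
    (PySem.Dict.ofList (pvGroups.map (fun g => (g.1, ([] : List String))))).getD g.1 [] = [] := by
  decide

theorem map_lower_pvGroups : ∀ g ∈ pvGroups, g.2.map PySem.Str.lower = g.2 := by decide

theorem main_eq (lines : List String) :
    build_focus_blocks lines = build_focus_blocks_alt lines := by
  simp only [build_focus_blocks, build_focus_blocks_alt]
  rw [PySem.List.foldl_congr_mem pvGroups _
      (fun secs g => secs ++
        [if keyword_windows lines (g.2.map PySem.Str.lower) 60 ≠ [] then
           "## " ++ g.1 ++ "\n" ++ clamp_text (keyword_windows lines (g.2.map PySem.Str.lower) 60) 6000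
         else "## " ++ g.1 ++ "\n(No direct matches in recent logs.)"])
      [] (fun acc g _ => by dsimp only; split <;> rfl)]
  rw [PySem.List.foldl_append_singleton_eq_map]
  rw [List.nil_append]
  congr 1
  apply List.map_congr_left
  intro g hg
  dsimp only
  rw [map_lower_pvGroups g hg, keyword_windows_eq_filter]
  obtain ⟨lab, toks⟩ := g
  exact render_eq _ lab (lines.filter (pMatch toks))
    (by rw [foldl_getD_filter lab toks hg lines _, acc0_getD _ hg, List.nil_append])

-- ===== VERDICT (by name: the statement is the Claim_ definition above) =====
theorem build_focus_blocks_spec : Claim_equal_build_focus_blocks := by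
  intro lines _
  unfold Spec_build_focus_blocks
  exact main_eq lines
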